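-- pv_equiv track=rewrite | github.com/weiyinfu/DailyAlgorithm | 运筹/九连环/01-九连环递归算法.py | down_all
-- ===== SOURCE A (Python) =====
-- def up(a, ind):
--     if ind == 0:
--         a[ind] = 1
--         return [['up', 0]]
--     ans = []
--     ans.extend(up(a, ind - 1))
--     ans.append(['up', ind])
--     a[ind] = 1
--     ans.extend(down(a, ind - 1))
--     return ans
--
-- def down(a, ind):
--     if ind == 0:
--         a[ind] = 0
--         return [['down', 0]]
--     ans = []
--     ans.extend(up(a, ind - 1))
--     ans.append(['down', ind])
--     a[ind] = 0
--     ans.extend(down(a, ind - 1))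
--     return ans
--
-- def down_all(a):
--     ans = []
--     while 1:
--         ind = -1
--         for i in range(len(a)):
--             if a[i] == 1:
--                 ind = i
--                 break
--         if ind == -1:
--             # 已经没有在上面的了
--             break
--         ans.extend(down(a, ind))
--     for i in ans:
--         i[1] += 1
--     return ans
-- ===== SOURCE B (Python) =====
-- # B: one forward pass. down(a, i) always nets to "clear rings 0..i" and its
-- # move list D(i) is independent of a, so scan a once left-to-right, appending
-- # the pure 1-based sequence gen_down(i) wherever a[i] == 1, then reproduce A's
-- # in-place mutation (slots 0..last set index become 0).
--
-- def gen_up(n):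
--     if n == 0:
--         return [['up', 1]]
--     return gen_up(n - 1) + [['up', n + 1]] + gen_down(n - 1)
--
-- def gen_down(n):
--     if n == 0:
--         return [['down', 1]]
--     return gen_up(n - 1) + [['down', n + 1]] + gen_down(n - 1)
--
-- def down_all(a):
--     ans = []
--     for i, v in enumerate(a):
--         if v == 1:
--             ans += gen_down(i)
--     for i in range(len(a) - 1, -1, -1):
--         if a[i] == 1:
--             for j in range(i + 1):
--                 a[j] = 0
--             break
--     return ans
-- ===== Notes on version B (the rewrite author's own statement) =====
-- stated objective: simpler
-- what changed: Replaces A's stateful while-loop (which repeatedly rescans the mutated array for the lowest set ring and appends moves produced by array-mutating recursion, then bumps every index by one in a final pass) with a single left-to-right pass that appends a pure, already 1-based move sequence gen_down(i) wherever a[i]==1, exploiting that down(a,i) ignores a's contents and nets to clearing slots 0..i.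
import Mathlib
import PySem

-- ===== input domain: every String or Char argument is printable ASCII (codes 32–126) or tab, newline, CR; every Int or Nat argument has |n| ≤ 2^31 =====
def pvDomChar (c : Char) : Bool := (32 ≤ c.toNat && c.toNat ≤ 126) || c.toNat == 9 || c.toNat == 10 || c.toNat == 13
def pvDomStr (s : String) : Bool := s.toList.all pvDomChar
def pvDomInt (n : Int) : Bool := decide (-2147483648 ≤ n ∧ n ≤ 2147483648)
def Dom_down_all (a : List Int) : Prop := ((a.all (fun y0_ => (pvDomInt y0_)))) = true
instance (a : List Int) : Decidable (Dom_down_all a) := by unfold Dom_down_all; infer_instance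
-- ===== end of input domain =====

-- B replaces A's stateful rescan-and-mutate while-loop by one forward pass appending
-- pure recursively generated move sequences (simpler); equivalence proved for the
-- RETURN value (both Pythons also perform A's in-place clearing of `a`).


-- ===== PORT A =====
-- up / down: state is (the mutated list, the accumulated move list); index is the
-- Nat recursion argument (Python only ever calls them with 0 ≤ ind < len(a)).
mutual
def upA : List Int → Nat → List Int × List (String × Int)
  | a, 0 => (a.set 0 1, [("up", 0)])
  | a, n + 1 =>
    let r1 := upA a n
    let a2 := r1.1.set (n + 1) 1
    let r2 := downA a2 n
    (r2.1, r1.2 ++ [("up", (n : Int) + 1)] ++ r2.2)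
def downA : List Int → Nat → List Int × List (String × Int)
  | a, 0 => (a.set 0 0, [("down", 0)])
  | a, n + 1 =>
    let r1 := upA a n
    let a2 := r1.1.set (n + 1) 0
    let r2 := downA a2 n
    (r2.1, r1.2 ++ [("down", (n : Int) + 1)] ++ r2.2)
end

-- the inner for-loop with break: index of the first element equal to 1 (ind = -1 ↦ none)
def firstOne : List Int → Option Nat
  | [] => none
  | x :: t => if x == 1 then some 0 else (firstOne t).map (· + 1)

-- the while-loop; fuel = a.length + 1 only makes it total: each iteration strictly
-- decreases the number of 1-entries (lemma countOnes_zeroTo_lt below), so fuel never runs out.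
def loopA : Nat → List Int → List (String × Int) → List (String × Int)
  | 0, _, ans => ans
  | f + 1, a, ans =>
    match firstOne a with
    | none => ans
    | some ind =>
      let r := downA a ind
      loopA f r.1 (ans ++ r.2)

def down_all (a : List Int) : List (String × Int) :=
  (loopA (a.length + 1) a []).map (fun m => (m.1, m.2 + 1))

-- ===== PORT B =====
mutual
def genUp : Nat → List (String × Int)
  | 0 => [("up", 1)]
  | n + 1 => genUp n ++ [("up", (n : Int) + 2)] ++ genDown n
def genDown : Nat → List (String × Int)
  | 0 => [("down", 1)]
  | n + 1 => genUp n ++ [("down", (n : Int) + 2)] ++ genDown n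
end

-- enumerate starts at 0, so p.1 is the nonnegative position and .toNat is exact
def down_all_alt (a : List Int) : List (String × Int) :=
  (PySem.List.enumerate a).foldl
    (fun ans p => if p.2 == 1 then ans ++ genDown p.1.toNat else ans) []

-- ===== PRECONDITION & SPEC =====
def Spec_down_all (a : List Int) (out : List (String × Int)) : Prop := out = down_all_alt a
instance (a : List Int) (out : List (String × Int)) : Decidable (Spec_down_all a out) := by unfold Spec_down_all; infer_instance

-- ===== CLAIM (what is proved, stated in full; the proofs are below) =====
def Claim_equal_down_all : Prop := ∀ (a : List Int), Dom_down_all a → Spec_down_all a (down_all a)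

-- ===== LEMMAS AND PROOFS =====

-- proof-side model of "clear slots 0..k-1"
def zeroTo : Nat → List Int → List Int
  | _, [] => []
  | 0, a => a
  | k + 1, _ :: t => 0 :: zeroTo k t

theorem zeroTo_zero (a : List Int) : zeroTo 0 a = a := by cases a <;> rfl

theorem zeroTo_set_lt (a : List Int) (x : Int) : ∀ k i, i < k → zeroTo k (a.set i x) = zeroTo k a := by
  induction a with
  | nil => intro k i _; rfl
  | cons y t ih =>
    intro k i h
    cases k with
    | zero => omega
    | succ k =>
      cases i with
      | zero => rfl
      | succ i => simp [List.set, zeroTo, ih k i (by omega)]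

theorem zeroTo_set_ge (a : List Int) (x : Int) : ∀ k i, k ≤ i → zeroTo k (a.set i x) = (zeroTo k a).set i x := by
  induction a with
  | nil => intro k i _; cases k <;> rfl
  | cons y t ih =>
    intro k i h
    cases k with
    | zero => simp [zeroTo_zero]
    | succ k =>
      cases i with
      | zero => omega
      | succ i => simp [List.set, zeroTo, ih k i (by omega)]

theorem zeroTo_succ : ∀ (a : List Int) (k : Nat), zeroTo (k + 1) a = (zeroTo k a).set k 0 := by
  intro a
  induction a with
  | nil => intro k; simp [zeroTo]
  | cons y t ih =>
    intro k
    cases k with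
    | zero => simp [zeroTo, zeroTo_zero]
    | succ k => simp [zeroTo, ih k]

theorem zeroTo_absorb : ∀ (a : List Int) (k m : Nat), k ≤ m → zeroTo m (zeroTo k a) = zeroTo m a := by
  intro a
  induction a with
  | nil => intro k m _; simp [zeroTo]
  | cons y t ih =>
    intro k m h
    cases k with
    | zero => rw [zeroTo_zero]
    | succ k =>
      cases m with
      | zero => omega
      | succ m => simp [zeroTo, ih k m (by omega)]

-- 1-based B moves minus one = raw A moves
theorem ud_spec : ∀ n : Nat,
    (∀ a : List Int, upA a n = ((zeroTo n a).set n 1, (genUp n).map (fun m => (m.1, m.2 - 1)))) ∧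
    (∀ a : List Int, downA a n = (zeroTo (n + 1) a, (genDown n).map (fun m => (m.1, m.2 - 1)))) := by
  intro n
  induction n with
  | zero =>
    constructor <;> intro a <;>
      simp [upA, downA, genUp, genDown, zeroTo_zero, zeroTo_succ]
  | succ n ih =>
    obtain ⟨ihu, ihd⟩ := ih
    constructor <;> intro a
    · rw [upA, ihu a, ihd]
      rw [zeroTo_set_ge _ _ (n + 1) (n + 1) le_rfl, zeroTo_set_lt _ _ (n + 1) n (by omega),
        zeroTo_absorb _ n (n + 1) (by omega)]
      simp [genUp]
      omega
    · rw [downA, ihu a, ihd]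
      rw [zeroTo_set_ge _ _ (n + 1) (n + 1) le_rfl, zeroTo_set_lt _ _ (n + 1) n (by omega),
        zeroTo_absorb _ n (n + 1) (by omega), ← zeroTo_succ]
      simp [genDown]
      omega

-- B's answer, generalized over the starting position
def MB : Nat → List Int → List (String × Int)
  | _, [] => []
  | k, x :: t => (if x = 1 then genDown k else []) ++ MB (k + 1) t

theorem MB_none : ∀ (a : List Int) (k : Nat), firstOne a = none → MB k a = [] := by
  intro a
  induction a with
  | nil => intro k _; rfl
  | cons x t ih =>
    intro k h
    by_cases hx : x = 1
    · simp [firstOne, hx] at h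
    · simp [firstOne, hx] at h
      simp [MB, hx, ih (k + 1) h]

theorem MB_step : ∀ (a : List Int) (i k : Nat), firstOne a = some i →
    MB k a = genDown (k + i) ++ MB k (zeroTo (i + 1) a) := by
  intro a
  induction a with
  | nil => intro i k h; simp [firstOne] at h
  | cons x t ih =>
    intro i k h
    by_cases hx : x = 1
    · simp [firstOne, hx] at h
      subst h
      simp [MB, hx, zeroTo, zeroTo_zero]
    · simp [firstOne, hx] at h
      obtain ⟨i', hi', rfl⟩ := h
      have := ih i' (k + 1) hi'
      simp [MB, hx, this, zeroTo]
      ring_nf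

theorem countOnes_zeroTo_lt : ∀ (a : List Int) (i : Nat), firstOne a = some i →
    (zeroTo (i + 1) a).countP (· == 1) < a.countP (· == 1) := by
  intro a
  induction a with
  | nil => intro i h; simp [firstOne] at h
  | cons x t ih =>
    intro i h
    by_cases hx : x = 1
    · simp [firstOne, hx] at h
      subst h
      simp [zeroTo, zeroTo_zero, hx]
    · simp [firstOne, hx] at h
      obtain ⟨i', hi', rfl⟩ := h
      have := ih i' hi'
      simp [zeroTo, hx]
      omega

theorem loop_spec : ∀ (f : Nat) (a : List Int) (ans : List (String × Int)),
    a.countP (· == 1) < f →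
    loopA f a ans = ans ++ (MB 0 a).map (fun m => (m.1, m.2 - 1)) := by
  intro f
  induction f with
  | zero => intro a ans h; omega
  | succ f ih =>
    intro a ans h
    cases hfo : firstOne a with
    | none => simp [loopA, hfo, MB_none a 0 hfo]
    | some i =>
      have hd := (ud_spec i).2 a
      simp only [loopA, hfo, hd]
      rw [ih _ _ (by have := countOnes_zeroTo_lt a i hfo; omega)]
      rw [MB_step a i 0 hfo]
      simp

theorem alt_fold : ∀ (a : List Int) (k : Nat) (acc : List (String × Int)),
    (PySem.List.enumerate a (k : Int)).foldl
      (fun ans p => if p.2 == 1 then ans ++ genDown p.1.toNat else ans) acc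
      = acc ++ MB k a := by
  intro a
  induction a with
  | nil => intro k acc; simp [PySem.List.enumerate, MB]
  | cons x t ih =>
    intro k acc
    rw [PySem.List.enumerate_cons]
    have hk : ((k : Int) + 1) = ((k + 1 : Nat) : Int) := by push_cast; ring
    by_cases hx : x = 1
    · simp only [List.foldl_cons, hx, hk, ih (k + 1)]
      simp [MB]
    · simp only [List.foldl_cons, hk, ih (k + 1)]
      simp [MB, hx]

theorem map_sub_add (l : List (String × Int)) :
    (l.map (fun m => (m.1, m.2 - 1))).map (fun m : String × Int => (m.1, m.2 + 1)) = l := by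
  induction l with
  | nil => rfl
  | cons h t ih => simp [ih]

-- ===== VERDICT (by name: the statement is the Claim_ definition above) =====
theorem down_all_spec : Claim_equal_down_all := by
  unfold Claim_equal_down_all Spec_down_all
  intro a _
  unfold down_all down_all_alt
  rw [loop_spec (a.length + 1) a [] (by have := List.countP_le_length (l := a) (p := (· == 1)); omega)]
  rw [List.nil_append, map_sub_add]
  have := alt_fold a 0 []
  simp only [Nat.cast_zero] at this
  rw [this, List.nil_append]
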